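-- pv_equiv track=rewrite | github.com/MarcinMariuszMorawski/PythonAlgorithms | StringSearchingAlgorithms/Sunday.py | find
-- ===== SOURCE A (Python) =====
-- def find(text, pattern):
--     found_at_array = []
--     text_length = len(text)
--     pattern_length = len(pattern)
--     comparison_count = 0
--     shift = [-1] * 256
--     p = 0
--
--     for index in range(pattern_length):
--         ascii_code = ord(pattern[index])
--         shift[ascii_code] = index
--
--     while p <= (text_length - pattern_length):
--         pattern_match = True
--
--         for index in range(pattern_length):
--             comparison_count += 1
--             if pattern[index] != text[p + index]:
--                 pattern_match = False
--                 break
--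
--         if pattern_match:
--             found_at_array.append(p)
--
--         p += pattern_length
--
--         if p < text_length:
--             ascii_code = ord(text[p])
--             p = p - shift[ascii_code]
--
--     return -1, comparison_count
-- ===== SOURCE B (Python) =====
-- def find(text, pattern):
--     # Z-algorithm over pattern + sentinel + text gives every pattern-vs-text
--     # LCP up front; the Sunday scan then reads each stop's comparison count
--     # from the table instead of rescanning characters.
--     n = len(text)
--     m = len(pattern)
--     s = list(pattern) + [None] + list(text)
--     big = len(s)
--     z = [0] * big
--     l = 0
--     r = 0
--     for i in range(1, big):
--         zi = min(r - i, z[i - l]) if i < r else 0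
--         while i + zi < big and s[zi] == s[i + zi]:
--             zi += 1
--         z[i] = zi
--         if i + zi > r:
--             l = i
--             r = i + zi
--     last = {}
--     for i, c in enumerate(pattern):
--         last[c] = i
--     total = 0
--     p = 0
--     while p <= n - m:
--         zp = z[m + 1 + p]
--         total += m if zp == m else zp + 1
--         p += m
--         if p < n:
--             p -= last.get(text[p], -1)
--     return -1, total
-- ===== Notes on version B (the rewrite author's own statement) =====
-- stated objective: alternative
-- what changed: B replaces A's per-stop character-by-character rescan with a Z-algorithm pass over pattern+sentinel+text that precomputes every pattern-vs-text LCP, so each Sunday stop reads its comparison count from the table.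
import Mathlib
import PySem

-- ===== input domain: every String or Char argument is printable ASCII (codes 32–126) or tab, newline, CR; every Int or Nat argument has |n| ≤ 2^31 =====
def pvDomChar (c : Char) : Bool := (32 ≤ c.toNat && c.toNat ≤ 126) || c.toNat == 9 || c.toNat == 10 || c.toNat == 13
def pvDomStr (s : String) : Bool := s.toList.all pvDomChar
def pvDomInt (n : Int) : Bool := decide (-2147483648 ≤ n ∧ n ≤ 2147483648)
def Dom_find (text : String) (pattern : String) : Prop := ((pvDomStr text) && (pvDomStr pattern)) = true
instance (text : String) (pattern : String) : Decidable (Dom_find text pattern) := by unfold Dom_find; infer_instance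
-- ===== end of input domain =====

-- B replaces A's per-stop character rescan by a Z-algorithm LCP table computed
-- up front (a different algorithm); return values agree whenever pattern ≠ "".
-- (A never reads found_at_array for its result, so neither port returns it.)

-- ===== PORT A =====
-- inner 'for index in range(pattern_length)' loop: counts comparisons, breaks on mismatch
def pvInnerA (pat chars : List Char) (p idx : Nat) (cnt : Int) : Bool × Int :=
  if idx < pat.length then
    let cnt' := cnt + 1
    if pat.getD idx ' ' ≠ chars.getD (p + idx) ' ' then (false, cnt')
    else pvInnerA pat chars p (idx + 1) cnt'
  else (true, cnt)
termination_by pat.length - idx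

-- the 'while p <= text_length - pattern_length' loop; fuel (n+2 at the call
-- site) only makes it total — inside Pre_find it is never exhausted
def pvLoopA (pat chars : List Char) (shift : List Int) : Nat → Int → Int → List Int → Int
  | 0, _, cnt, _ => cnt
  | fuel + 1, p, cnt, found =>
    if p ≤ (chars.length : Int) - (pat.length : Int) then
      let r := pvInnerA pat chars p.toNat 0 cnt
      let found' := if r.1 then found ++ [p] else found
      let p1 := p + (pat.length : Int)
      let p2 := if p1 < (chars.length : Int) then
          p1 - shift.getD (chars.getD p1.toNat ' ').toNat (-1) else p1
      pvLoopA pat chars shift fuel p2 r.2 found'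
    else cnt

def find (text : String) (pattern : String) : Int × Int :=
  let chars := text.toList
  let pat := pattern.toList
  -- 'shift = [-1]*256; for index in range(m): shift[ord(pattern[index])] = index'
  let shift := (PySem.List.enumerate pat 0).foldl
      (fun sh ic => sh.set ic.2.toNat ic.1) (List.replicate 256 (-1 : Int))
  (-1, pvLoopA pat chars shift (chars.length + 2) 0 0 [])

-- ===== PORT B =====
-- 'while i + zi < big and s[zi] == s[i + zi]: zi += 1'
def pvZext (s : List (Option Char)) (i : Nat) (zi : Nat) : Nat :=
  if h : i + zi < s.length ∧ s.getD zi none = s.getD (i + zi) none then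
    pvZext s i (zi + 1)
  else zi
termination_by s.length - (i + zi)
decreasing_by omega

-- body of 'for i in range(1, big)' over state (z, l, r)
def pvZstep (s : List (Option Char)) (st : List Nat × Nat × Nat) (i : Nat) :
    List Nat × Nat × Nat :=
  let z0 := if i < st.2.2 then min (st.2.2 - i) (st.1.getD (i - st.2.1) 0) else 0
  let zi := pvZext s i z0
  let z' := st.1.set i zi
  if st.2.2 < i + zi then (z', i, i + zi) else (z', st.2.1, st.2.2)

-- 'while p <= n - m' scan; fuel as in pvLoopA
def pvLoopB (chars : List Char) (m : Nat) (z : List Nat) (last : PySem.Dict Char Int) :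
    Nat → Int → Int → Int
  | 0, _, total => total
  | fuel + 1, p, total =>
    if p ≤ (chars.length : Int) - (m : Int) then
      let zp := z.getD (m + 1 + p.toNat) 0
      let total' := total + (if zp = m then (m : Int) else (zp : Int) + 1)
      let p1 := p + (m : Int)
      let p2 := if p1 < (chars.length : Int) then
          p1 - last.getD (chars.getD p1.toNat ' ') (-1) else p1
      pvLoopB chars m z last fuel p2 total'
    else total

def find_alt (text : String) (pattern : String) : Int × Int :=
  let chars := text.toList
  let pat := pattern.toList
  let s := pat.map some ++ none :: chars.map some
  let z := ((List.range' 1 (s.length - 1)).foldl (pvZstep s)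
      (List.replicate s.length 0, 0, 0)).1
  let last := (PySem.List.enumerate pat 0).foldl
      (fun d ic => d.insert ic.2 ic.1) (PySem.Dict.empty : PySem.Dict Char Int)
  (-1, pvLoopB chars pat.length z last (chars.length + 2) 0 0)

-- ===== PRECONDITION & SPEC =====
-- Pre_find excludes only the empty pattern, on which A's while loop never
-- terminates (p stops advancing once p = len(text)); A returns on everything else.
def Pre_find (text : String) (pattern : String) : Prop := pattern ≠ ""
instance (text : String) (pattern : String) : Decidable (Pre_find text pattern) := by
  unfold Pre_find; infer_instance

def pvWitness_find : String × String := ("sundaysearch", "day")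

def Spec_find (text : String) (pattern : String) (out : Int × Int) : Prop :=
  out = find_alt text pattern
instance (text : String) (pattern : String) (out : Int × Int) :
    Decidable (Spec_find text pattern out) := by unfold Spec_find; infer_instance

-- ===== CLAIM (what is proved, stated in full; the proofs are below) =====
def Claim_equal_find : Prop := ∀ (text : String) (pattern : String),
  Dom_find text pattern → Pre_find text pattern → Spec_find text pattern (find text pattern)

-- ===== LEMMAS AND PROOFS =====

-- longest common prefix of two lists
def pvLcp {α : Type} [DecidableEq α] : List α → List α → Nat
  | a :: u, b :: v => if a = b then pvLcp u v + 1 else 0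
  | _, _ => 0

theorem pvLcp_le_right {α : Type} [DecidableEq α] (u v : List α) : pvLcp u v ≤ v.length := by
  induction u generalizing v with
  | nil => cases v <;> simp [pvLcp]
  | cons a u ih =>
    cases v with
    | nil => simp [pvLcp]
    | cons b v =>
      simp only [pvLcp, List.length_cons]
      split
      · have := ih v; omega
      · omega

theorem getD_eq_of_lt_pvLcp {α : Type} [DecidableEq α] (u v : List α) (j : Nat) (d : α)
    (h : j < pvLcp u v) : u.getD j d = v.getD j d := by
  induction u generalizing v j with
  | nil => cases v <;> simp [pvLcp] at h
  | cons a u ih =>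
    cases v with
    | nil => simp [pvLcp] at h
    | cons b v =>
      simp only [pvLcp] at h
      split at h
      · cases j with
        | zero => simpa using ‹a = b›
        | succ j => simpa using ih v j (by omega)
      · omega

theorem le_pvLcp_of_getD {α : Type} [DecidableEq α] (u v : List α) (k : Nat) (d : α)
    (hu : k ≤ u.length) (hv : k ≤ v.length)
    (h : ∀ j, j < k → u.getD j d = v.getD j d) : k ≤ pvLcp u v := by
  induction u generalizing v k with
  | nil => simp at hu; omega
  | cons a u ih =>
    cases k with
    | zero => omega
    | succ k =>
      cases v with
      | nil => simp at hv
      | cons b v =>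
        have hab : a = b := by simpa using h 0 (by omega)
        simp only [pvLcp, if_pos hab]
        have := ih v k (by simpa using hu) (by simpa using hv)
          (fun j hj => by simpa using h (j + 1) (by omega))
        omega

theorem getD_drop {α : Type} [Inhabited α] (l : List α) (i j : Nat) (d : α) :
    (l.drop i).getD j d = l.getD (i + j) d := by
  simp [List.getD_eq_getElem?_getD, List.getElem?_drop]

theorem pvZext_eq (s : List (Option Char)) (i zi : Nat)
    (h : zi ≤ pvLcp s (s.drop i)) : pvZext s i zi = pvLcp s (s.drop i) := by
  revert h
  fun_induction pvZext s i zi with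
  | case1 zi h1 ih =>
    intro h
    apply ih
    apply le_pvLcp_of_getD s (s.drop i) (zi + 1) none
    · omega
    · simp only [List.length_drop]; omega
    · intro j hj
      rcases Nat.lt_or_ge j zi with hlt | hge
      · exact getD_eq_of_lt_pvLcp _ _ _ _ (by omega)
      · have hj' : j = zi := by omega
        subst hj'
        rw [getD_drop]
        exact h1.2
  | case2 zi h1 =>
    intro h
    rcases Nat.lt_or_ge zi (pvLcp s (s.drop i)) with hlt | hge
    · exfalso
      have hlen : pvLcp s (s.drop i) ≤ s.length - i := by
        have := pvLcp_le_right s (s.drop i); simpa using this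
      have heq := getD_eq_of_lt_pvLcp s (s.drop i) zi none hlt
      rw [getD_drop] at heq
      exact h1 ⟨by omega, heq⟩
    · omega

-- invariant of the Z loop before processing index i
def ZInv (s : List (Option Char)) (i : Nat) (st : List Nat × Nat × Nat) : Prop :=
  st.1.length = s.length ∧
  (∀ j, 1 ≤ j → j < i → st.1.getD j 0 = pvLcp s (s.drop j)) ∧
  (0 < st.2.2 → 1 ≤ st.2.1 ∧ st.2.1 < i ∧ st.2.2 ≤ s.length ∧
     st.2.2 - st.2.1 ≤ pvLcp s (s.drop st.2.1))

theorem getD_set_self {α : Type} (l : List α) (i : Nat) (a d : α) (h : i < l.length) :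
    (l.set i a).getD i d = a := by
  simp [List.getD_eq_getElem?_getD, h]

theorem getD_set_ne {α : Type} (l : List α) (i j : Nat) (a d : α) (h : i ≠ j) :
    (l.set i a).getD j d = l.getD j d := by
  simp [List.getD_eq_getElem?_getD, List.getElem?_set_ne, h]

theorem pvZstep_inv (s : List (Option Char)) (i : Nat) (st : List Nat × Nat × Nat)
    (hi : 1 ≤ i) (hiL : i < s.length) (h : ZInv s i st) :
    ZInv s (i + 1) (pvZstep s st i) := by
  obtain ⟨z, l, r⟩ := st
  obtain ⟨hlen, hent, hwin⟩ := h
  simp only at hlen hent hwin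
  have hz0 : (if i < r then min (r - i) (z.getD (i - l) 0) else 0) ≤ pvLcp s (s.drop i) := by
    split
    case isTrue hir =>
      obtain ⟨hl1, hli, hrL, hwl⟩ := hwin (by omega)
      have hzil : z.getD (i - l) 0 = pvLcp s (s.drop (i - l)) :=
        hent (i - l) (by omega) (by omega)
      rw [hzil]
      apply le_pvLcp_of_getD s (s.drop i) _ none
      · omega
      · simp only [List.length_drop]; omega
      · intro j hj
        have e1 : s.getD j none = s.getD (i - l + j) none := by
          have e := getD_eq_of_lt_pvLcp s (s.drop (i - l)) j none (by omega)
          rwa [getD_drop] at e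
        have e2 : s.getD (i - l + j) none = s.getD (i + j) none := by
          have e := getD_eq_of_lt_pvLcp s (s.drop l) (i - l + j) none (by omega)
          rw [getD_drop, show l + (i - l + j) = i + j by omega] at e
          exact e
        rw [getD_drop]
        exact e1.trans e2
    case isFalse _ => omega
  have hzi := pvZext_eq s i _ hz0
  have hqle : pvLcp s (s.drop i) ≤ s.length - i := by
    have := pvLcp_le_right s (s.drop i); simpa using this
  simp only [pvZstep, hzi]
  split
  case isTrue hlt =>
    refine ⟨by simpa using hlen, ?_, ?_⟩
    · intro j hj1 hj2
      rcases Nat.lt_or_ge j i with hji | hji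
      · rw [getD_set_ne _ _ _ _ _ (by omega)]
        exact hent j hj1 hji
      · have : j = i := by omega
        subst this
        rw [getD_set_self _ _ _ _ (by omega)]
    · intro _
      refine ⟨?_, ?_, ?_, ?_⟩
      · show 1 ≤ i; omega
      · show i < i + 1; omega
      · show i + pvLcp s (s.drop i) ≤ s.length; omega
      · show i + pvLcp s (s.drop i) - i ≤ pvLcp s (s.drop i); omega
  case isFalse hge =>
    refine ⟨by simpa using hlen, ?_, ?_⟩
    · intro j hj1 hj2
      rcases Nat.lt_or_ge j i with hji | hji
      · rw [getD_set_ne _ _ _ _ _ (by omega)]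
        exact hent j hj1 hji
      · have : j = i := by omega
        subst this
        rw [getD_set_self _ _ _ _ (by omega)]
    · intro hr'
      obtain ⟨hl1, hli, hrL, hwl⟩ := hwin hr'
      exact ⟨hl1, show l < i + 1 by omega, hrL, hwl⟩

theorem zfold_inv (s : List (Option Char)) (cnt : Nat) : ∀ (start : Nat)
    (st : List Nat × Nat × Nat), 1 ≤ start → start + cnt ≤ s.length → ZInv s start st →
    ZInv s (start + cnt) ((List.range' start cnt).foldl (pvZstep s) st) := by
  induction cnt with
  | zero => intro start st _ _ h; simpa using h
  | succ cnt ih =>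
    intro start st h1 h2 h
    rw [List.range'_succ, List.foldl_cons]
    have := ih (start + 1) (pvZstep s st start) (by omega) (by omega)
      (pvZstep_inv s start st h1 (by omega) h)
    rwa [show start + 1 + cnt = start + (cnt + 1) by omega] at this

-- value of the final z table
theorem z_table_eq (s : List (Option Char)) (j : Nat) (h1 : 1 ≤ j) (h2 : j < s.length) :
    (((List.range' 1 (s.length - 1)).foldl (pvZstep s)
      (List.replicate s.length 0, 0, 0)).1).getD j 0 = pvLcp s (s.drop j) := by
  have hinit : ZInv s 1 (List.replicate s.length 0, 0, 0) := by
    refine ⟨by simp, ?_, ?_⟩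
    · intro j h1 h2; omega
    · intro h; simp at h
  have := zfold_inv s (s.length - 1) 1 (List.replicate s.length 0, 0, 0)
    (by omega) (by omega) hinit
  rw [show 1 + (s.length - 1) = s.length by omega] at this
  exact this.2.1 j h1 h2

theorem pvLcp_sentinel (pat : List Char) : ∀ (cs : List Char) (rest : List (Option Char)),
    pvLcp (pat.map some ++ none :: rest) (cs.map some) = min (pvLcp pat cs) pat.length := by
  induction pat with
  | nil =>
    intro cs rest
    cases cs <;> simp [pvLcp]
  | cons a pat ih =>
    intro cs rest
    cases cs with
    | nil => simp [pvLcp]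
    | cons c cs =>
      simp only [List.map_cons, List.cons_append, pvLcp, List.length_cons]
      by_cases hac : a = c
      · subst hac
        simp [ih]
      · simp [hac]

theorem pvInnerA_snd (pat chars : List Char) (p : Nat)
    (hp : p + pat.length ≤ chars.length) : ∀ (idx : Nat) (cnt : Int), idx ≤ pat.length →
    (pvInnerA pat chars p idx cnt).2 =
      cnt + ((min (pvLcp (pat.drop idx) (chars.drop (p + idx)) + 1) (pat.length - idx) : Nat) : Int) := by
  intro idx cnt hidx
  revert hidx
  fun_induction pvInnerA pat chars p idx cnt with
  | case1 idx cnt hlt cnt' hne =>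
    intro hidx
    have hci : p + idx < chars.length := by omega
    have hcnt : cnt' = cnt + 1 := rfl
    rw [List.drop_eq_getElem_cons hlt, List.drop_eq_getElem_cons hci]
    simp only [pvLcp]
    rw [if_neg (by
      rw [List.getD_eq_getElem _ _ hlt, List.getD_eq_getElem _ _ hci] at hne
      exact hne)]
    rw [show min (0 + 1) (pat.length - idx) = 1 by omega]
    simp [hcnt]
  | case2 idx cnt hlt cnt' hne ih =>
    intro hidx
    have hci : p + idx < chars.length := by omega
    have hcnt : cnt' = cnt + 1 := rfl
    rw [List.drop_eq_getElem_cons hlt, List.drop_eq_getElem_cons hci]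
    simp only [pvLcp]
    rw [if_pos (by
      rw [List.getD_eq_getElem _ _ hlt, List.getD_eq_getElem _ _ hci] at hne
      simpa using hne)]
    rw [show p + idx + 1 = p + (idx + 1) by omega]
    rw [ih (by omega), hcnt]
    rw [show min (pvLcp (pat.drop (idx + 1)) (chars.drop (p + (idx + 1))) + 1 + 1) (pat.length - idx)
        = min (pvLcp (pat.drop (idx + 1)) (chars.drop (p + (idx + 1))) + 1) (pat.length - (idx + 1)) + 1 by omega]
    push_cast
    ring
  | case3 idx cnt hge =>
    intro hidx
    have : idx = pat.length := by omega
    subst this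
    simp [pvLcp, List.drop_length]

theorem tables_agree (l : List (Int × Char)) : ∀ (sh : List Int) (d : PySem.Dict Char Int),
    sh.length = 256 → (∀ ic ∈ l, ic.2.toNat < 256) →
    (∀ c : Char, c.toNat < 256 → sh.getD c.toNat (-1) = d.getD c (-1)) →
    ∀ c : Char, c.toNat < 256 →
      (l.foldl (fun sh ic => sh.set ic.2.toNat ic.1) sh).getD c.toNat (-1) =
      (l.foldl (fun d ic => d.insert ic.2 ic.1) d).getD c (-1) := by
  induction l with
  | nil =>
    intro sh d _ _ hrel c hc
    simpa using hrel c hc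
  | cons a l ih =>
    intro sh d hlen hmem hrel c hc
    simp only [List.foldl_cons]
    apply ih
    · simpa using hlen
    · intro ic hic; exact hmem ic (List.mem_cons_of_mem _ hic)
    · intro c' hc'
      by_cases hca : c' = a.2
      · subst hca
        rw [getD_set_self _ _ _ _ (by
          rw [hlen]; exact hmem a (List.mem_cons_self) )]
        simp
      · have hne : c'.toNat ≠ a.2.toNat := by
          intro h
          have h' : c'.val.toNat = a.2.val.toNat := h
          exact hca (Char.ext (UInt32.toNat_inj.mp h'))
        rw [getD_set_ne _ _ _ _ _ (Ne.symm hne)]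
        rw [PySem.Dict.getD_insert]
        rw [if_neg hca]
        exact hrel c' hc'
    · exact hc

-- the dict values stay in [-1, M)
theorem dict_bound (l : List (Int × Char)) (M : Int) : ∀ (d : PySem.Dict Char Int),
    (∀ c : Char, -1 ≤ d.getD c (-1) ∧ d.getD c (-1) < M) → (∀ ic ∈ l, 0 ≤ ic.1 ∧ ic.1 < M) →
    ∀ c : Char, -1 ≤ (l.foldl (fun d ic => d.insert ic.2 ic.1) d).getD c (-1) ∧
      (l.foldl (fun d ic => d.insert ic.2 ic.1) d).getD c (-1) < M := by
  induction l with
  | nil => intro d hd _ c; exact hd c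
  | cons a l ih =>
    intro d hd hmem c
    simp only [List.foldl_cons]
    apply ih
    · intro c'
      rw [PySem.Dict.getD_insert]
      split
      · have := hmem a (List.mem_cons_self); omega
      · exact hd c'
    · intro ic hic; exact hmem ic (List.mem_cons_of_mem _ hic)

theorem loops_eq (pat chars : List Char) (shift : List Int) (z : List Nat)
    (last : PySem.Dict Char Int) (hm : 1 ≤ pat.length)
    (hsh : ∀ c : Char, c ∈ chars → shift.getD c.toNat (-1) = last.getD c (-1))
    (hb : ∀ c : Char, -1 ≤ last.getD c (-1) ∧ last.getD c (-1) < (pat.length : Int))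
    (hz : ∀ q : Nat, q + pat.length ≤ chars.length →
      z.getD (pat.length + 1 + q) 0 = min (pvLcp pat (chars.drop q)) pat.length) :
    ∀ (fuel : Nat) (p cnt : Int) (found : List Int), 0 ≤ p →
      pvLoopA pat chars shift fuel p cnt found = pvLoopB chars pat.length z last fuel p cnt := by
  intro fuel
  induction fuel with
  | zero => intro p cnt found hp; rfl
  | succ fuel ih =>
    intro p cnt found hp
    have hpn : ((p.toNat : Int)) = p := Int.toNat_of_nonneg hp
    by_cases hc : p ≤ (chars.length : Int) - (pat.length : Int)
    · have hbound : p.toNat + pat.length ≤ chars.length := by omega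
      have hL := pvInnerA_snd pat chars p.toNat hbound 0 cnt (by omega)
      simp only [List.drop_zero, Nat.add_zero, Nat.sub_zero] at hL
      have hzp := hz p.toNat hbound
      simp only [pvLoopA, pvLoopB, if_pos hc]
      rw [hL]
      have hcost : cnt + ((min (pvLcp pat (chars.drop p.toNat) + 1) pat.length : Nat) : Int) =
          cnt + (if z.getD (pat.length + 1 + p.toNat) 0 = pat.length then (pat.length : Int)
                 else (z.getD (pat.length + 1 + p.toNat) 0 : Int) + 1) := by
        rw [hzp]
        split
        case isTrue h => push_cast; omega
        case isFalse h =>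
          have : pvLcp pat (chars.drop p.toNat) < pat.length := by omega
          push_cast
          omega
      rw [hcost]
      by_cases hlt : p + (pat.length : Int) < (chars.length : Int)
      · rw [if_pos hlt, if_pos hlt]
        have hidx : (p + (pat.length : Int)).toNat < chars.length := by omega
        have hmem : chars.getD (p + (pat.length : Int)).toNat ' ' ∈ chars := by
          rw [List.getD_eq_getElem _ _ hidx]
          exact List.getElem_mem hidx
        rw [hsh _ hmem]
        apply ih
        have hbd := hb (chars.getD (p + (pat.length : Int)).toNat ' ')
        omega
      · rw [if_neg hlt, if_neg hlt]
        apply ih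
        omega
    · simp only [pvLoopA, pvLoopB, if_neg hc]

-- ===== VERDICT (by name: the statement is the Claim_ definition above) =====
theorem find_spec : Claim_equal_find := by
  intro text pattern hdom hpre
  have hdom' := hdom
  unfold Dom_find at hdom'
  simp only [Bool.and_eq_true, pvDomStr, List.all_eq_true, pvDomChar] at hdom'
  obtain ⟨htext, hpat⟩ := hdom'
  have htext' : ∀ c ∈ text.toList, c.toNat < 256 := by
    intro c hc
    have := htext c hc
    simp only [Bool.or_eq_true, Bool.and_eq_true, decide_eq_true_eq, beq_iff_eq] at this
    omega
  have hpat' : ∀ c ∈ pattern.toList, c.toNat < 256 := by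
    intro c hc
    have := hpat c hc
    simp only [Bool.or_eq_true, Bool.and_eq_true, decide_eq_true_eq, beq_iff_eq] at this
    omega
  have hm : 1 ≤ pattern.toList.length := by
    rcases Nat.eq_zero_or_pos pattern.toList.length with h | h
    · exact absurd (String.toList_eq_nil_iff.mp (List.length_eq_zero_iff.mp h)) hpre
    · exact h
  set pat := pattern.toList with hpatdef
  set chars := text.toList with hcharsdef
  set s : List (Option Char) := pat.map some ++ none :: chars.map some with hs
  have hslen : s.length = pat.length + 1 + chars.length := by
    rw [hs]; simp; omega
  set zT : List Nat := ((List.range' 1 (s.length - 1)).foldl (pvZstep s)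
      (List.replicate s.length 0, 0, 0)).1 with hzT
  set lastT : PySem.Dict Char Int := (PySem.List.enumerate pat 0).foldl
      (fun d ic => d.insert ic.2 ic.1) (PySem.Dict.empty : PySem.Dict Char Int) with hlastT
  set shiftT : List Int := (PySem.List.enumerate pat 0).foldl
      (fun sh ic => sh.set ic.2.toNat ic.1) (List.replicate 256 (-1 : Int)) with hshiftT
  have hmemE : ∀ ic ∈ PySem.List.enumerate pat 0, ic.2.toNat < 256 := by
    intro ic hic
    obtain ⟨k, hk, rfl⟩ := (PySem.List.mem_enumerate_iff pat 0 ic).mp hic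
    exact hpat' _ (List.getElem_mem hk)
  have hsh : ∀ c : Char, c ∈ chars → shiftT.getD c.toNat (-1) = lastT.getD c (-1) := by
    intro c hc
    rw [hshiftT, hlastT]
    apply tables_agree (PySem.List.enumerate pat 0) _ _ List.length_replicate
      hmemE ?_ c (htext' c hc)
    intro c' hc'
    rw [List.getD_eq_getElem?_getD, List.getElem?_replicate, if_pos hc']
    simp [PySem.Dict.getD, PySem.Dict.get?, PySem.Dict.empty]
  have hb : ∀ c : Char, -1 ≤ lastT.getD c (-1) ∧ lastT.getD c (-1) < (pat.length : Int) := by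
    rw [hlastT]
    apply dict_bound (PySem.List.enumerate pat 0) (pat.length : Int)
    · intro c
      constructor
      · simp [PySem.Dict.getD, PySem.Dict.get?, PySem.Dict.empty]
      · simp [PySem.Dict.getD, PySem.Dict.get?, PySem.Dict.empty]
        omega
    · intro ic hic
      obtain ⟨k, hk, rfl⟩ := (PySem.List.mem_enumerate_iff pat 0 ic).mp hic
      constructor
      · simp
      · simp; omega
  have hz : ∀ q : Nat, q + pat.length ≤ chars.length →
      zT.getD (pat.length + 1 + q) 0 = min (pvLcp pat (chars.drop q)) pat.length := by
    intro q hq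
    rw [hzT, z_table_eq s _ (by omega) (by omega)]
    have hdrop : s.drop (pat.length + 1 + q) = (chars.drop q).map some := by
      rw [hs, List.drop_append]
      rw [List.drop_eq_nil_of_le (by simp; omega)]
      rw [show pat.length + 1 + q - (pat.map some).length = q + 1 by simp; omega]
      rw [List.drop_succ_cons, List.nil_append]
      simp [List.map_drop]
    rw [hdrop, pvLcp_sentinel]
  show (find text pattern) = find_alt text pattern
  simp only [find, find_alt]
  exact congrArg (fun x => ((-1 : Int), x))
    (loops_eq pat chars shiftT zT lastT hm hsh hb hz (chars.length + 2) 0 0 [] le_rfl)
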